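-- pv_equiv track=rewrite | github.com/differentialdistinguisher/Enhanced-related-key-differential-neural-distinguishers | Basic/Simeck4896/simeck4896_rkdiff.py | expand_key_simeck
-- ===== SOURCE A (Python) =====
-- def WORD_SIZE():
--     return(24)
--
-- MASK_VAL = 2 ** WORD_SIZE() - 1
--
-- const_simeck = [0xfffffd, 0xfffffd, 0xfffffd, 0xfffffd, 0xfffffd, 0xfffffc, 0xfffffc, 0xfffffc, 0xfffffd, 0xfffffd, 0xfffffc, 0xfffffd, 0xfffffd, 0xfffffd, 0xfffffc, 0xfffffd, 0xfffffc, 0xfffffd, 0xfffffc, 0xfffffc, 0xfffffc, 0xfffffc, 0xfffffd, 0xfffffc, 0xfffffc, 0xfffffd, 0xfffffc, 0xfffffd, 0xfffffd, 0xfffffc, 0xfffffc, 0xfffffd, 0xfffffd, 0xfffffd, 0xfffffd, 0xfffffd]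
--
-- def rol(x,k):
--     return(((x << k) & MASK_VAL) | (x >> (WORD_SIZE() - k)))
--
-- def expand_key_simeck(k, t):
--     ks = [0 for i in range(t)]
--     ks_tmp = [0,0,0,0]
--     ks_tmp[0] = k[3]
--     ks_tmp[1] = k[2]
--     ks_tmp[2] = k[1]
--     ks_tmp[3] = k[0]
--     ks[0] = ks_tmp[0]
--     for i in range(1, t):
--         ks[i] = ks_tmp[1]
--         tmp = (rol(ks_tmp[1], 5) & rol(ks_tmp[1], 0)) ^ rol(ks_tmp[1], 1) ^ ks[i-1] ^ const_simeck[i-1]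
--         ks_tmp[1] = ks_tmp[2]
--         ks_tmp[2] = ks_tmp[3]
--         ks_tmp[3] = tmp
--     return(ks)
-- ===== SOURCE B (Python) =====
-- def WORD_SIZE():
--     return(24)
--
-- MASK_VAL = 2 ** WORD_SIZE() - 1
--
-- const_simeck = [0xfffffd, 0xfffffd, 0xfffffd, 0xfffffd, 0xfffffd, 0xfffffc, 0xfffffc, 0xfffffc, 0xfffffd, 0xfffffd, 0xfffffc, 0xfffffd, 0xfffffd, 0xfffffd, 0xfffffc, 0xfffffd, 0xfffffc, 0xfffffd, 0xfffffc, 0xfffffc, 0xfffffc, 0xfffffc, 0xfffffd, 0xfffffc, 0xfffffc, 0xfffffd, 0xfffffc, 0xfffffd, 0xfffffd, 0xfffffc, 0xfffffc, 0xfffffd, 0xfffffd, 0xfffffd, 0xfffffd, 0xfffffd]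
--
-- def rol(x,k):
--     return(((x << k) & MASK_VAL) | (x >> (WORD_SIZE() - k)))
--
-- def expand_key_simeck(k, t):
--     # Write the round keys directly into ks: ks[0..3] come from k (reversed),
--     # each later entry ks[i+3] is the feedback of ks[i] and ks[i-1].
--     ks = [0] * t
--     init = [k[3], k[2], k[1], k[0]]
--     for j in range(min(t, 4)):
--         ks[j] = init[j]
--     for i in range(1, t):
--         fb = (rol(ks[i], 5) & rol(ks[i], 0)) ^ rol(ks[i], 1) ^ ks[i-1] ^ const_simeck[i-1]
--         if i + 3 < t:
--             ks[i+3] = fb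
--     return ks
-- ===== Notes on version B (the rewrite author's own statement) =====
-- stated objective: simpler
-- what changed: B removes the four-word ks_tmp shift register entirely: it prefills ks[0..min(t,4)-1] from the key and writes each round's feedback word directly into ks[i+3] (when in range), reading operands back from the output array itself.
import Mathlib
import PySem

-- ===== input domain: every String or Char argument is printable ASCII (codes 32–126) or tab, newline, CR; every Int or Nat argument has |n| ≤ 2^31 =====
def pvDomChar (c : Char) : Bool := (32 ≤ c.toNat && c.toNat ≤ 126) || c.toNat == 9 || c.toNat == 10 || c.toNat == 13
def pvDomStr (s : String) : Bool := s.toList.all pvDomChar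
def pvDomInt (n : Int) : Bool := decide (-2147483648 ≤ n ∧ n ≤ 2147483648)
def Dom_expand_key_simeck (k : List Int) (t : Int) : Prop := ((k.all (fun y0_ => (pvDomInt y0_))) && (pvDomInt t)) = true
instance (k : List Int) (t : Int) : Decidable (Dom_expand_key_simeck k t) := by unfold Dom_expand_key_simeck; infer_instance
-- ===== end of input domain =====

-- B replaces A's four-word shift register ks_tmp by writing each feedback word
-- directly into the output array at ks[i+3]: simpler, no register shuffling.

-- ===== PORT A =====
def pvMask : Int := 16777215

def pvConst : List Int := [16777213, 16777213, 16777213, 16777213, 16777213, 16777212, 16777212, 16777212, 16777213, 16777213, 16777212, 16777213, 16777213, 16777213, 16777212, 16777213, 16777212, 16777213, 16777212, 16777212, 16777212, 16777212, 16777213, 16777212, 16777212, 16777213, 16777212, 16777213, 16777213, 16777212, 16777212, 16777213, 16777213, 16777213, 16777213, 16777213]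

def pvRol (x : Int) (j : Nat) : Int :=
  PySem.Int.bor (PySem.Int.band (x <<< j) pvMask) (x >>> (24 - j))

def expand_key_simeck (k : List Int) (t : Int) : List Int :=
  let ks := List.replicate t.toNat 0
  let w0 := PySem.List.pyGetD k 3 0
  let w1 := PySem.List.pyGetD k 2 0
  let w2 := PySem.List.pyGetD k 1 0
  let w3 := PySem.List.pyGetD k 0 0
  let ks := ks.set 0 w0
  let st := (PySem.List.pyRange 1 t).foldl
    (fun (st : List Int × Int × Int × Int) (i : Int) =>
      let ks := st.1.set i.toNat st.2.1
      let tmp := PySem.Int.bxor (PySem.Int.bxor (PySem.Int.bxor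
          (PySem.Int.band (pvRol st.2.1 5) (pvRol st.2.1 0)) (pvRol st.2.1 1))
          (PySem.List.pyGetD ks (i - 1) 0))
          (PySem.List.pyGetD pvConst (i - 1) 0)
      (ks, st.2.2.1, st.2.2.2, tmp))
    (ks, w1, w2, w3)
  st.1

-- ===== PORT B =====
def expand_key_simeck_alt (k : List Int) (t : Int) : List Int :=
  let ks := List.replicate t.toNat 0
  let init := [PySem.List.pyGetD k 3 0, PySem.List.pyGetD k 2 0,
               PySem.List.pyGetD k 1 0, PySem.List.pyGetD k 0 0]
  let ks := (PySem.List.pyRange 0 (min t 4)).foldl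
    (fun ks (j : Int) => ks.set j.toNat (PySem.List.pyGetD init j 0)) ks
  (PySem.List.pyRange 1 t).foldl
    (fun ks (i : Int) =>
      let x := PySem.List.pyGetD ks i 0
      let fb := PySem.Int.bxor (PySem.Int.bxor (PySem.Int.bxor
          (PySem.Int.band (pvRol x 5) (pvRol x 0)) (pvRol x 1))
          (PySem.List.pyGetD ks (i - 1) 0))
          (PySem.List.pyGetD pvConst (i - 1) 0)
      if i + 3 < t then ks.set (i + 3).toNat fb else ks)
    ks

-- ===== PRECONDITION & SPEC =====
-- Pre_ is exactly where A returns: k needs four entries (k[3] else IndexError),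
-- t ≥ 1 (else the write ks[0] is an IndexError on the empty ks),
-- and t ≤ 37 (the loop reads const_simeck[t-2], which has 36 entries).
def Pre_expand_key_simeck (k : List Int) (t : Int) : Prop :=
  4 ≤ k.length ∧ 1 ≤ t ∧ t ≤ 37
instance (k : List Int) (t : Int) : Decidable (Pre_expand_key_simeck k t) := by
  unfold Pre_expand_key_simeck; infer_instance

def pvWitness_expand_key_simeck : List Int × Int := ([5, 6, 7, 8], 6)

def Spec_expand_key_simeck (k : List Int) (t : Int) (out : List Int) : Prop := out = expand_key_simeck_alt k t
instance (k : List Int) (t : Int) (out : List Int) : Decidable (Spec_expand_key_simeck k t out) := by unfold Spec_expand_key_simeck; infer_instance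

-- ===== CLAIM (what is proved, stated in full; the proofs are below) =====
def Claim_equal_expand_key_simeck : Prop := ∀ (k : List Int) (t : Int), Dom_expand_key_simeck k t → Pre_expand_key_simeck k t → Spec_expand_key_simeck k t (expand_key_simeck k t)

-- ===== LEMMAS AND PROOFS =====

-- the round feedback function
def pvF (x y c : Int) : Int :=
  PySem.Int.bxor (PySem.Int.bxor (PySem.Int.bxor
    (PySem.Int.band (pvRol x 5) (pvRol x 0)) (pvRol x 1)) y) c

-- the mathematical key-schedule sequence both programs compute
def pvSeq (a b c d : Int) : Nat → Int
  | 0 => a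
  | 1 => b
  | 2 => c
  | 3 => d
  | n + 4 => pvF (pvSeq a b c d (n + 1)) (pvSeq a b c d n) (PySem.List.pyGetD pvConst (↑n) 0)

-- set on a range-map stays a range-map
lemma set_map_range (n : Nat) (f : Nat → Int) (idx : Nat) (v : Int) :
    ((List.range n).map f).set idx v
      = (List.range n).map (fun j => if j = idx then v else f j) := by
  apply List.ext_getElem <;> simp [List.getElem_set]
  intro i hi
  by_cases hcase : i = idx <;> simp [hcase]
  omega

lemma A_loop (a b c d : Int) (t m : Nat) (hm : m + 1 ≤ t) :
    (PySem.List.pyRange 1 (1 + (m : Int))).foldl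
      (fun (st : List Int × Int × Int × Int) (i : Int) =>
        let ks := st.1.set i.toNat st.2.1
        let tmp := PySem.Int.bxor (PySem.Int.bxor (PySem.Int.bxor
            (PySem.Int.band (pvRol st.2.1 5) (pvRol st.2.1 0)) (pvRol st.2.1 1))
            (PySem.List.pyGetD ks (i - 1) 0))
            (PySem.List.pyGetD pvConst (i - 1) 0)
        (ks, st.2.2.1, st.2.2.2, tmp))
      ((List.replicate t 0).set 0 a, b, c, d)
    = ((List.range t).map (fun j => if j ≤ m then pvSeq a b c d j else 0),
       pvSeq a b c d (m + 1), pvSeq a b c d (m + 2), pvSeq a b c d (m + 3)) := by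
  induction m with
  | zero =>
    have hr : PySem.List.pyRange 1 (1 + ((0 : Nat) : Int)) = [] := by decide
    rw [hr]
    simp only [List.foldl_nil, Prod.mk.injEq]
    refine ⟨?_, by simp [pvSeq], by simp [pvSeq], by simp [pvSeq]⟩
    apply List.ext_getElem
    · simp
    · intro i h1 h2
      simp only [List.getElem_set, List.getElem_replicate, List.getElem_map, List.getElem_range]
      by_cases hi : i = 0
      · simp [hi, pvSeq]
      · rw [if_neg (by omega), if_neg (by omega)]
  | succ m ih =>
    have hm' : m + 1 ≤ t := by omega
    have hcast : (1 : Int) + ((m + 1 : Nat) : Int) = (1 + (m : Int)) + 1 := by omega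
    rw [hcast, PySem.List.pyRange_one_succ_right (by omega), List.foldl_append, ih hm']
    simp only [List.foldl_cons, List.foldl_nil]
    have hidx : ((1 : Int) + (m : Int)).toNat = m + 1 := by omega
    have hget : PySem.List.pyGetD
        (((List.range t).map (fun j => if j ≤ m then pvSeq a b c d j else 0)).set
          ((1 : Int) + (m : Int)).toNat (pvSeq a b c d (m + 1)))
        (1 + (m : Int) - 1) 0 = pvSeq a b c d m := by
      rw [hidx, set_map_range t _ (m + 1) _]
      have : (1 + (m : Int) - 1) = ((m : Nat) : Int) := by omega
      rw [this, PySem.List.pyGetD_natCast, PySem.List.getD_map_range _ _ _ _ (by omega)]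
      simp
    rw [hget]
    have hc : (1 + (m : Int) - 1) = ((m : Nat) : Int) := by omega
    rw [hidx, hc]
    simp only [Prod.mk.injEq]
    refine ⟨?_, trivial, trivial, ?_⟩
    · rw [set_map_range t _ (m + 1) _]
      apply List.map_congr_left
      intro j hj
      by_cases h1 : j = m + 1
      · simp [h1]
      · by_cases h2 : j ≤ m <;> simp [h1, h2] <;> omega
    · show pvF (pvSeq a b c d (m + 1)) (pvSeq a b c d m) (PySem.List.pyGetD pvConst (↑m) 0)
        = pvSeq a b c d (m + 1 + 3)
      rw [show m + 1 + 3 = m + 4 from rfl, pvSeq]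

lemma B_prefill_aux (a b c d : Int) (t r : Nat) (hr : r ≤ 4) :
    (PySem.List.pyRange 0 (r : Int)).foldl
      (fun ks (j : Int) => ks.set j.toNat (PySem.List.pyGetD [a, b, c, d] j 0))
      (List.replicate t 0)
    = (List.range t).map (fun j => if j < r then pvSeq a b c d j else 0) := by
  induction r with
  | zero =>
    have hr0 : PySem.List.pyRange 0 (((0 : Nat) : Int)) = [] := by decide
    rw [hr0]
    apply List.ext_getElem
    · simp
    · intro i h1 h2; simp
  | succ r ih =>
    have hcast : (((r + 1 : Nat)) : Int) = ((r : Nat) : Int) + 1 := by omega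
    rw [hcast, PySem.List.pyRange_one_succ_right (by omega), List.foldl_append, ih (by omega)]
    simp only [List.foldl_cons, List.foldl_nil, Int.toNat_natCast]
    have hv : PySem.List.pyGetD [a, b, c, d] ((r : Nat) : Int) 0 = pvSeq a b c d r := by
      have hr3 : r ≤ 3 := by omega
      interval_cases r <;> simp [PySem.List.pyGetD_ofNat', pvSeq]
    rw [hv, set_map_range t _ r _]
    apply List.map_congr_left
    intro j hj
    by_cases h1 : j = r
    · simp [h1]
    · by_cases h2 : j < r <;> simp [h1, h2] <;> omega

lemma B_prefill (a b c d : Int) (t : Nat) :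
    (PySem.List.pyRange 0 (min (t : Int) 4)).foldl
      (fun ks (j : Int) => ks.set j.toNat (PySem.List.pyGetD [a, b, c, d] j 0))
      (List.replicate t 0)
    = (List.range t).map (fun j => if j < min t 4 then pvSeq a b c d j else 0) := by
  have hmin : (min (t : Int) 4) = ((min t 4 : Nat) : Int) := by omega
  rw [hmin, B_prefill_aux a b c d t (min t 4) (by omega)]

lemma B_loop (a b c d : Int) (t m : Nat) (hm : m + 1 ≤ t) :
    (PySem.List.pyRange 1 (1 + (m : Int))).foldl
      (fun ks (i : Int) =>
        let x := PySem.List.pyGetD ks i 0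
        let fb := PySem.Int.bxor (PySem.Int.bxor (PySem.Int.bxor
            (PySem.Int.band (pvRol x 5) (pvRol x 0)) (pvRol x 1))
            (PySem.List.pyGetD ks (i - 1) 0))
            (PySem.List.pyGetD pvConst (i - 1) 0)
        if i + 3 < (t : Int) then ks.set (i + 3).toNat fb else ks)
      ((List.range t).map (fun j => if j < min t 4 then pvSeq a b c d j else 0))
    = (List.range t).map (fun j => if j < min t (m + 4) then pvSeq a b c d j else 0) := by
  induction m with
  | zero =>
    have hr : PySem.List.pyRange 1 (1 + ((0 : Nat) : Int)) = [] := by decide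
    rw [hr]
    simp
  | succ m ih =>
    have hm' : m + 1 ≤ t := by omega
    have hcast : (1 : Int) + ((m + 1 : Nat) : Int) = (1 + (m : Int)) + 1 := by omega
    rw [hcast, PySem.List.pyRange_one_succ_right (by omega), List.foldl_append, ih hm']
    simp only [List.foldl_cons, List.foldl_nil]
    have hc : (1 + (m : Int) - 1) = ((m : Nat) : Int) := by omega
    rw [hc]
    have hx : PySem.List.pyGetD
        ((List.range t).map (fun j => if j < min t (m + 4) then pvSeq a b c d j else 0))
        (1 + (m : Int)) 0 = pvSeq a b c d (m + 1) := by
      have : (1 + (m : Int)) = (((m + 1 : Nat)) : Int) := by omega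
      rw [this, PySem.List.pyGetD_natCast, PySem.List.getD_map_range _ _ _ _ (by omega)]
      rw [if_pos (by omega)]
    have hy : PySem.List.pyGetD
        ((List.range t).map (fun j => if j < min t (m + 4) then pvSeq a b c d j else 0))
        (((m : Nat)) : Int) 0 = pvSeq a b c d m := by
      rw [PySem.List.pyGetD_natCast, PySem.List.getD_map_range _ _ _ _ (by omega)]
      rw [if_pos (by omega)]
    rw [hx, hy]
    have hfb : pvF (pvSeq a b c d (m + 1)) (pvSeq a b c d m) (PySem.List.pyGetD pvConst (↑m) 0)
        = pvSeq a b c d (m + 4) := (pvSeq.eq_5 a b c d m).symm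
    by_cases hlt : 1 + (m : Int) + 3 < (t : Int)
    · rw [if_pos hlt]
      have hidx : ((1 : Int) + (m : Int) + 3).toNat = m + 4 := by omega
      rw [hidx]
      show ((List.range t).map (fun j => if j < min t (m + 4) then pvSeq a b c d j else 0)).set
          (m + 4) (pvF (pvSeq a b c d (m + 1)) (pvSeq a b c d m) (PySem.List.pyGetD pvConst (↑m) 0))
        = (List.range t).map (fun j => if j < min t (m + 1 + 4) then pvSeq a b c d j else 0)
      rw [hfb, set_map_range t _ (m + 4) _]
      apply List.map_congr_left
      intro j hj
      by_cases h1 : j = m + 4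
      · simp [h1]; omega
      · by_cases h2 : j < min t (m + 4) <;> simp [h1, h2] <;> omega
    · rw [if_neg hlt]
      apply List.map_congr_left
      intro j hj
      by_cases h2 : j < min t (m + 4) <;> simp [h2] <;> omega

lemma A_full (a b c d : Int) (t : Nat) (ht : 1 ≤ t) :
    ((PySem.List.pyRange 1 (t : Int)).foldl
      (fun (st : List Int × Int × Int × Int) (i : Int) =>
        let ks := st.1.set i.toNat st.2.1
        let tmp := PySem.Int.bxor (PySem.Int.bxor (PySem.Int.bxor
            (PySem.Int.band (pvRol st.2.1 5) (pvRol st.2.1 0)) (pvRol st.2.1 1))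
            (PySem.List.pyGetD ks (i - 1) 0))
            (PySem.List.pyGetD pvConst (i - 1) 0)
        (ks, st.2.2.1, st.2.2.2, tmp))
      ((List.replicate t 0).set 0 a, b, c, d)).1
    = (List.range t).map (pvSeq a b c d) := by
  have hb : ((t : Nat) : Int) = 1 + ((t - 1 : Nat) : Int) := by omega
  rw [hb, A_loop a b c d t (t - 1) (by omega)]
  apply List.map_congr_left
  intro j hj
  rw [if_pos (by simp at hj; omega)]

lemma B_full (a b c d : Int) (t : Nat) (ht : 1 ≤ t) :
    (PySem.List.pyRange 1 (t : Int)).foldl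
      (fun ks (i : Int) =>
        let x := PySem.List.pyGetD ks i 0
        let fb := PySem.Int.bxor (PySem.Int.bxor (PySem.Int.bxor
            (PySem.Int.band (pvRol x 5) (pvRol x 0)) (pvRol x 1))
            (PySem.List.pyGetD ks (i - 1) 0))
            (PySem.List.pyGetD pvConst (i - 1) 0)
        if i + 3 < (t : Int) then ks.set (i + 3).toNat fb else ks)
      ((List.range t).map (fun j => if j < min t 4 then pvSeq a b c d j else 0))
    = (List.range t).map (pvSeq a b c d) := by
  have hpy : PySem.List.pyRange 1 ((t : Nat) : Int)
      = PySem.List.pyRange 1 (1 + ((t - 1 : Nat) : Int)) := by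
    congr 1; omega
  rw [hpy, B_loop a b c d t (t - 1) (by omega)]
  apply List.map_congr_left
  intro j hj
  rw [if_pos (by simp at hj; omega)]

-- bridge: unfold the ports to the raw folds the loop lemmas talk about
lemma A_eval (k : List Int) (t : Int) :
    expand_key_simeck k t
    = ((PySem.List.pyRange 1 t).foldl
        (fun (st : List Int × Int × Int × Int) (i : Int) =>
          let ks := st.1.set i.toNat st.2.1
          let tmp := PySem.Int.bxor (PySem.Int.bxor (PySem.Int.bxor
              (PySem.Int.band (pvRol st.2.1 5) (pvRol st.2.1 0)) (pvRol st.2.1 1))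
              (PySem.List.pyGetD ks (i - 1) 0))
              (PySem.List.pyGetD pvConst (i - 1) 0)
          (ks, st.2.2.1, st.2.2.2, tmp))
        ((List.replicate t.toNat 0).set 0 (PySem.List.pyGetD k 3 0),
          PySem.List.pyGetD k 2 0, PySem.List.pyGetD k 1 0, PySem.List.pyGetD k 0 0)).1 := rfl

lemma B_eval (k : List Int) (t : Int) :
    expand_key_simeck_alt k t
    = (PySem.List.pyRange 1 t).foldl
        (fun ks (i : Int) =>
          let x := PySem.List.pyGetD ks i 0
          let fb := PySem.Int.bxor (PySem.Int.bxor (PySem.Int.bxor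
              (PySem.Int.band (pvRol x 5) (pvRol x 0)) (pvRol x 1))
              (PySem.List.pyGetD ks (i - 1) 0))
              (PySem.List.pyGetD pvConst (i - 1) 0)
          if i + 3 < t then ks.set (i + 3).toNat fb else ks)
        ((PySem.List.pyRange 0 (min t 4)).foldl
          (fun ks (j : Int) => ks.set j.toNat
            (PySem.List.pyGetD [PySem.List.pyGetD k 3 0, PySem.List.pyGetD k 2 0,
              PySem.List.pyGetD k 1 0, PySem.List.pyGetD k 0 0] j 0))
          (List.replicate t.toNat 0)) := rfl

-- ===== VERDICT (by name: the statement is the Claim_ definition above) =====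
theorem expand_key_simeck_spec : Claim_equal_expand_key_simeck := by
  intro k t _ hpre
  obtain ⟨hk, ht1, ht37⟩ := hpre
  unfold Spec_expand_key_simeck
  have hnt : ((t.toNat : Nat) : Int) = t := Int.toNat_of_nonneg (by omega)
  rw [A_eval, B_eval, ← hnt]
  simp only [Int.toNat_natCast]
  rw [B_prefill, A_full _ _ _ _ t.toNat (by omega), B_full _ _ _ _ t.toNat (by omega)]
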